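-- pv_equiv track=rewrite | github.com/DonQueso89/aoc | 2024/12/main.py | contiguous_groups
-- ===== SOURCE A (Python) =====
-- def contiguous_groups(coords, level_dim, contiguous_dim):
--     coords = sorted(coords, key=lambda x: (x[level_dim], x[contiguous_dim]))
--     n = 0
--     prev = None
--     for c in coords:
--         if prev is None or c[contiguous_dim] - prev[contiguous_dim] > 1 or c[level_dim] != prev[level_dim]:
--             n += 1
--         prev = c
--     return n
-- ===== SOURCE B (Python) =====
-- def contiguous_groups(coords, level_dim, contiguous_dim):
--     s = {(c[level_dim], c[contiguous_dim]) for c in coords}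
--     return sum(1 for k in s if (k[0], k[1] - 1) not in s)
-- ===== Notes on version B (the rewrite author's own statement) =====
-- stated objective: faster
-- what changed: Replaces sort-then-linear-scan-with-prev by building a hash set of (level,contig) keys once and counting the keys whose predecessor (level,contig-1) is absent from the set (no sorting at all).
import Mathlib
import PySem

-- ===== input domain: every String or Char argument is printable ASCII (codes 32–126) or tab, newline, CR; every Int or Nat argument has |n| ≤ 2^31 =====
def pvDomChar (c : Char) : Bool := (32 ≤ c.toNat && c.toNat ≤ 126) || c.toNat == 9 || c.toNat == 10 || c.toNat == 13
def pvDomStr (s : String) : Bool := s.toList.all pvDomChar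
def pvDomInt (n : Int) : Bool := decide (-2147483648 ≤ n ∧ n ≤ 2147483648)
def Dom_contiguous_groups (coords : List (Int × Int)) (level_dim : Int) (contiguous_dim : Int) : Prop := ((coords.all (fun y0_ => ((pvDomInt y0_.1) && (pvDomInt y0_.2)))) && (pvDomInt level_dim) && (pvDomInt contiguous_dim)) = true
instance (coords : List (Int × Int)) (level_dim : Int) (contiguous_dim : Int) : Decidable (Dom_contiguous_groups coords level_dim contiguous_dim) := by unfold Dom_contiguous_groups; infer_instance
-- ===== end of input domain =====

-- B replaces A's sort-then-scan by a hash set of (level,contig) keys, counting keys whose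
-- predecessor key is absent (no sort, O(n) expected); same return value on Pre_.

-- shared primitive: Python's c[d] on the 2-tuple c (total form; exact under Pre_, which
-- keeps d a valid tuple index whenever coords is non-empty)
def pvIdx (c : Int × Int) (d : Int) : Int := PySem.List.pyGetD [c.1, c.2] d 0

-- ===== PORT A =====
def contiguous_groups (coords : List (Int × Int)) (level_dim : Int) (contiguous_dim : Int) : Int :=
  let cs := PySem.List.sorted2 coords (fun x => pvIdx x level_dim) (fun x => pvIdx x contiguous_dim)
  (cs.foldl (fun (st : Int × Option (Int × Int)) c =>
      match st.2 with
      | none => (st.1 + 1, some c)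
      | some p =>
          if pvIdx c contiguous_dim - pvIdx p contiguous_dim > 1 ∨ pvIdx c level_dim ≠ pvIdx p level_dim
          then (st.1 + 1, some c)
          else (st.1, some c)) ((0 : Int), (none : Option (Int × Int)))).1

-- ===== PORT B =====
def contiguous_groups_alt (coords : List (Int × Int)) (level_dim : Int) (contiguous_dim : Int) : Int :=
  let s : PySem.Set (Int × Int) :=
    PySem.Set.ofList (coords.map fun c => (pvIdx c level_dim, pvIdx c contiguous_dim))
  ((s.countP fun k => !(PySem.Set.contains s (k.1, k.2 - 1))) : Int)

-- ===== PRECONDITION & SPEC =====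
-- Pre_ excludes exactly the inputs where Python A raises IndexError: a non-empty coords with a
-- dimension index outside the valid tuple-index range {-2,-1,0,1} (B raises there too).
def Pre_contiguous_groups (coords : List (Int × Int)) (level_dim : Int) (contiguous_dim : Int) : Prop :=
  coords = [] ∨ (-2 ≤ level_dim ∧ level_dim ≤ 1 ∧ -2 ≤ contiguous_dim ∧ contiguous_dim ≤ 1)
instance (coords : List (Int × Int)) (level_dim : Int) (contiguous_dim : Int) : Decidable (Pre_contiguous_groups coords level_dim contiguous_dim) := by unfold Pre_contiguous_groups; infer_instance
def pvWitness_contiguous_groups : (List (Int × Int)) × Int × Int := ([(0, 0), (0, 1), (2, 3)], 0, 1)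

def Spec_contiguous_groups (coords : List (Int × Int)) (level_dim : Int) (contiguous_dim : Int) (out : Int) : Prop := out = contiguous_groups_alt coords level_dim contiguous_dim
instance (coords : List (Int × Int)) (level_dim : Int) (contiguous_dim : Int) (out : Int) : Decidable (Spec_contiguous_groups coords level_dim contiguous_dim out) := by unfold Spec_contiguous_groups; infer_instance

-- ===== CLAIM (what is proved, stated in full; the proofs are below) =====
def Claim_equal_contiguous_groups : Prop := ∀ (coords : List (Int × Int)) (level_dim : Int) (contiguous_dim : Int), Dom_contiguous_groups coords level_dim contiguous_dim → Pre_contiguous_groups coords level_dim contiguous_dim → Spec_contiguous_groups coords level_dim contiguous_dim (contiguous_groups coords level_dim contiguous_dim)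

-- ===== LEMMAS AND PROOFS =====

-- the (level, contig) key of a coordinate
def pvKey (ld cd : Int) (c : Int × Int) : Int × Int := (pvIdx c ld, pvIdx c cd)

-- the key that would immediately precede k in its run
def pvPred (k : Int × Int) : Int × Int := (k.1, k.2 - 1)

-- A's scan over the sorted key list, written recursively (prev = first argument)
def pvScan (p : Int × Int) : List (Int × Int) → Nat
  | [] => 0
  | c :: rest => (if c.2 - p.2 > 1 ∨ c.1 ≠ p.1 then 1 else 0) + pvScan c rest

def pvScanTop : List (Int × Int) → Nat
  | [] => 0
  | c :: rest => 1 + pvScan c rest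

-- lexicographic ≤ on keys, the order A sorts by
def pvLexLe (a b : Int × Int) : Prop := a.1 < b.1 ∨ (a.1 = b.1 ∧ a.2 ≤ b.2)

-- A's fold, named so the lemmas can talk about it
def pvStep (ld cd : Int) (st : Int × Option (Int × Int)) (c : Int × Int) : Int × Option (Int × Int) :=
  match st.2 with
  | none => (st.1 + 1, some c)
  | some p =>
      if pvIdx c cd - pvIdx p cd > 1 ∨ pvIdx c ld ≠ pvIdx p ld
      then (st.1 + 1, some c)
      else (st.1, some c)

theorem contiguous_groups_eq (coords : List (Int × Int)) (ld cd : Int) :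
    contiguous_groups coords ld cd =
      ((PySem.List.sorted2 coords (fun x => pvIdx x ld) (fun x => pvIdx x cd)).foldl
        (pvStep ld cd) ((0 : Int), (none : Option (Int × Int)))).1 := rfl

theorem pvFold_some (ld cd : Int) (l : List (Int × Int)) : ∀ (n : Int) (p : Int × Int),
    (l.foldl (pvStep ld cd) (n, some p)).1 = n + (pvScan (pvKey ld cd p) (l.map (pvKey ld cd)) : Int) := by
  induction l with
  | nil => intro n p; simp [pvScan]
  | cons c t ih =>
    intro n p
    simp only [List.foldl_cons, List.map_cons, pvScan, pvStep, pvKey]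
    by_cases h : pvIdx c cd - pvIdx p cd > 1 ∨ pvIdx c ld ≠ pvIdx p ld
    · simp only [if_pos h, ih]
      unfold pvKey; push_cast; ring
    · simp only [if_neg h, ih]
      unfold pvKey; push_cast; ring

theorem pvFold_none (ld cd : Int) (l : List (Int × Int)) :
    (l.foldl (pvStep ld cd) ((0 : Int), (none : Option (Int × Int)))).1
      = (pvScanTop (l.map (pvKey ld cd)) : Int) := by
  cases l with
  | nil => simp [pvScanTop]
  | cons c t =>
    simp only [List.foldl_cons, List.map_cons, pvScanTop, pvStep, pvFold_some]
    push_cast; ring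

theorem pvFoldl_insertBy_pairwise {α κ : Type} [LinearOrder κ] (key : α → κ) :
    ∀ (xs acc : List α), acc.Pairwise (fun a b => key a ≤ key b) →
      (xs.foldl (fun acc x => PySem.List.insertBy (fun a b => decide (key a < key b)) x acc) acc).Pairwise
        (fun a b => key a ≤ key b) := by
  intro xs
  induction xs with
  | nil => intro acc h; exact h
  | cons x t ih =>
    intro acc h
    exact ih _ (PySem.List.insertBy_pairwise_le key x acc h)

theorem pvSorted2_pairwise (coords : List (Int × Int)) (ld cd : Int) :
    ((PySem.List.sorted2 coords (fun x => pvIdx x ld) (fun x => pvIdx x cd)).map (pvKey ld cd)).Pairwise pvLexLe := by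
  have hb : (fun a b => decide (pvIdx a ld < pvIdx b ld) || (!decide (pvIdx b ld < pvIdx a ld) && decide (pvIdx a cd < pvIdx b cd)))
      = (fun a b : Int × Int => decide (toLex (pvKey ld cd a) < toLex (pvKey ld cd b))) := by
    funext a b
    apply Bool.eq_iff_iff.mpr
    simp only [Bool.or_eq_true, Bool.and_eq_true, Bool.not_eq_true', decide_eq_true_eq,
      decide_eq_false_iff_not, Prod.Lex.lt_iff, ofLex_toLex, pvKey]
    omega
  have hs : PySem.List.sorted2 coords (fun x => pvIdx x ld) (fun x => pvIdx x cd)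
      = coords.foldl (fun acc x => PySem.List.insertBy (fun a b => decide (toLex (pvKey ld cd a) < toLex (pvKey ld cd b))) x acc) [] := by
    unfold PySem.List.sorted2
    simp only [hb]
    rfl
  rw [hs]
  have hp := pvFoldl_insertBy_pairwise (fun x => toLex (pvKey ld cd x)) coords [] (by simp)
  rw [List.pairwise_map]
  refine hp.imp ?_
  intro a b h
  rw [Prod.Lex.le_iff] at h
  exact h.imp id (fun ⟨h1, h2⟩ => ⟨h1, h2⟩)

theorem pvAlt_card (coords : List (Int × Int)) (ld cd : Int) :
    contiguous_groups_alt coords ld cd =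
      ((((coords.map (pvKey ld cd)).toFinset.filter fun k => pvPred k ∉ (coords.map (pvKey ld cd)).toFinset)).card : Int) := by
  have hkey : (fun c : Int × Int => (pvIdx c ld, pvIdx c cd)) = pvKey ld cd := rfl
  set ks := coords.map (pvKey ld cd) with hks
  set s : PySem.Set (Int × Int) := PySem.Set.ofList ks with hs
  have hsnd : s.Nodup := PySem.Set.nodup_ofList ks
  have hmem : ∀ x : Int × Int, x ∈ s ↔ x ∈ ks := fun x => PySem.Set.mem_ofList ks x
  have hfin : s.toFinset = ks.toFinset := by
    ext x; simp [List.mem_toFinset, hmem x]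
  have hcount : List.countP (fun k => !PySem.Set.contains s (k.1, k.2 - 1)) s
      = ((ks.toFinset.filter fun k => pvPred k ∉ ks.toFinset)).card := by
    rw [List.countP_eq_length_filter, ← List.toFinset_card_of_nodup (hsnd.filter _),
      List.toFinset_filter, hfin]
    congr 1
    apply Finset.filter_congr
    intro k hk
    rw [List.mem_toFinset] at hk
    have : PySem.Set.contains s (k.1, k.2 - 1) = true ↔ pvPred k ∈ ks.toFinset := by
      rw [PySem.Set.contains_iff s _, hmem _, List.mem_toFinset, pvPred]
    simp only [Bool.not_eq_true', ← Bool.not_eq_true, this]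
  show ((List.countP (fun k => !PySem.Set.contains s (k.1, k.2 - 1)) s : Nat) : Int) = _
  exact_mod_cast hcount

-- the predecessor key of c is below c, hence in no list of elements lex-≥ c
theorem pvPred_notMem {c : Int × Int} {rest : List (Int × Int)}
    (hcall : ∀ x ∈ rest, pvLexLe c x) : pvPred c ∉ insert c rest.toFinset := by
  intro hmem
  rcases Finset.mem_insert.mp hmem with h | h
  · obtain ⟨c1, c2⟩ := c
    simp only [pvPred, Prod.mk.injEq] at h
    omega
  · have := hcall _ (List.mem_toFinset.mp h)
    obtain ⟨c1, c2⟩ := c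
    simp only [pvPred, pvLexLe] at this
    omega

theorem pvScan_sorted (L : List (Int × Int)) : ∀ (p : Int × Int), (p :: L).Pairwise pvLexLe →
    pvScan p L = ((L.toFinset.filter fun k => k ≠ p ∧ pvPred k ∉ insert p L.toFinset)).card := by
  induction L with
  | nil => intro p _; simp [pvScan]
  | cons c rest ih =>
    intro p hp
    obtain ⟨hpall, hrest⟩ := List.pairwise_cons.mp hp
    obtain ⟨hcall, _⟩ := List.pairwise_cons.mp hrest
    have hpc : pvLexLe p c := hpall c List.mem_cons_self
    have ihc := ih c hrest
    set R := rest.toFinset with hR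
    -- the two filter predicates
    set P : Int × Int → Prop := fun k => k ≠ p ∧ pvPred k ∉ insert p (insert c R) with hPdef
    set Q : Int × Int → Prop := fun k => k ≠ c ∧ pvPred k ∉ insert c R with hQdef
    have hQc : ¬ Q c := by intro h; exact h.1 rfl
    have hpredc : pvPred c ∉ insert c R := pvPred_notMem (fun x hx => hcall x hx)
    -- P c holds exactly when A's scan counts c after prev = p
    have hPc_iff : P c ↔ (c.2 - p.2 > 1 ∨ c.1 ≠ p.1) := by
      simp only [hPdef, Finset.mem_insert, not_or]
      constructor
      · rintro ⟨hcp, hp1, -⟩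
        obtain ⟨c1, c2⟩ := c; obtain ⟨p1, p2⟩ := p
        simp only [pvPred, Prod.mk.injEq, not_and_or, ne_eq] at hcp hp1 ⊢
        simp only [pvLexLe] at hpc
        omega
      · intro h
        refine ⟨?_, ?_, fun hm => hpredc (Finset.mem_insert.mpr (Or.inl hm)),
            fun hm => hpredc (Finset.mem_insert.mpr (Or.inr hm))⟩
        · obtain ⟨c1, c2⟩ := c; obtain ⟨p1, p2⟩ := p
          simp only [Prod.mk.injEq, not_and_or, ne_eq] at h ⊢
          omega
        · obtain ⟨c1, c2⟩ := c; obtain ⟨p1, p2⟩ := p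
          simp only [pvPred, Prod.mk.injEq, not_and_or, ne_eq] at h ⊢
          simp only [pvLexLe] at hpc
          omega
    -- on rest's elements other than c, the two predicates agree
    have hPQ : ∀ k ∈ R, k ≠ c → (P k ↔ Q k) := by
      intro k hkR hkc
      have hck : pvLexLe c k := hcall k (List.mem_toFinset.mp hkR)
      simp only [hPdef, hQdef, Finset.mem_insert, not_or]
      constructor
      · rintro ⟨-, -, hc, hR'⟩
        exact ⟨hkc, hc, hR'⟩
      · rintro ⟨-, hc, hR'⟩
        refine ⟨?_, ?_, hc, hR'⟩
        · obtain ⟨c1, c2⟩ := c; obtain ⟨p1, p2⟩ := p; obtain ⟨k1, k2⟩ := k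
          simp only [pvLexLe] at hpc hck
          simp only [Prod.mk.injEq, not_and_or, ne_eq] at hkc ⊢
          omega
        · obtain ⟨c1, c2⟩ := c; obtain ⟨p1, p2⟩ := p; obtain ⟨k1, k2⟩ := k
          simp only [pvLexLe] at hpc hck
          simp only [pvPred, Prod.mk.injEq, not_and_or, ne_eq] at hkc hc ⊢
          omega
    have hgoalset : (c :: rest).toFinset = insert c R := by simp [hR]
    rw [hgoalset] at *
    show (if c.2 - p.2 > 1 ∨ c.1 ≠ p.1 then 1 else 0) + pvScan c rest = ((insert c R).filter P).card
    by_cases hPc : P c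
    · have hset : (insert c R).filter P = insert c (R.filter Q) := by
        ext k
        simp only [Finset.mem_filter, Finset.mem_insert]
        constructor
        · rintro ⟨hk | hkR, hPk⟩
          · exact Or.inl hk
          · by_cases hkc : k = c
            · exact Or.inl hkc
            · exact Or.inr ⟨hkR, (hPQ k hkR hkc).mp hPk⟩
        · rintro (hk | ⟨hkR, hQk⟩)
          · exact ⟨Or.inl hk, hk ▸ hPc⟩
          · have hkc : k ≠ c := fun h => hQc (h ▸ hQk)
            exact ⟨Or.inr hkR, (hPQ k hkR hkc).mpr hQk⟩
      have hcnot : c ∉ R.filter Q := fun h => hQc (Finset.mem_filter.mp h).2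
      rw [hset, Finset.card_insert_of_notMem hcnot, if_pos (hPc_iff.mp hPc), ihc]
      simp only [hQdef]
      omega
    · have hset : (insert c R).filter P = R.filter Q := by
        rw [Finset.filter_insert, if_neg hPc]
        apply Finset.filter_congr
        intro k hkR
        by_cases hkc : k = c
        · subst hkc; exact iff_of_false hPc hQc
        · exact hPQ k hkR hkc
      rw [hset, if_neg (fun h => hPc (hPc_iff.mpr h)), ihc]
      simp only [hQdef]
      omega

theorem pvScanTop_sorted (L : List (Int × Int)) (h : L.Pairwise pvLexLe) :
    pvScanTop L = ((L.toFinset.filter fun k => pvPred k ∉ L.toFinset)).card := by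
  cases L with
  | nil => simp [pvScanTop]
  | cons c rest =>
    obtain ⟨hcall, _⟩ := List.pairwise_cons.mp h
    have ihc := pvScan_sorted rest c h
    set R := rest.toFinset with hR
    set P0 : Int × Int → Prop := fun k => pvPred k ∉ insert c R with hP0
    set Q : Int × Int → Prop := fun k => k ≠ c ∧ pvPred k ∉ insert c R with hQdef
    have hQc : ¬ Q c := by intro hq; exact hq.1 rfl
    have hP0c : P0 c := pvPred_notMem hcall
    have hgoalset : (c :: rest).toFinset = insert c R := by simp [hR]
    rw [hgoalset]
    show 1 + pvScan c rest = ((insert c R).filter P0).card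
    have hset : (insert c R).filter P0 = insert c (R.filter Q) := by
      ext k
      simp only [Finset.mem_filter, Finset.mem_insert]
      constructor
      · rintro ⟨hk | hkR, hPk⟩
        · exact Or.inl hk
        · by_cases hkc : k = c
          · exact Or.inl hkc
          · exact Or.inr ⟨hkR, ⟨hkc, hPk⟩⟩
      · rintro (hk | ⟨hkR, hQk⟩)
        · exact ⟨Or.inl hk, hk ▸ hP0c⟩
        · exact ⟨Or.inr hkR, hQk.2⟩
    have hcnot : c ∉ R.filter Q := fun hmem => hQc (Finset.mem_filter.mp hmem).2
    rw [hset, Finset.card_insert_of_notMem hcnot, ihc]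
    simp only [hQdef]
    omega

-- ===== VERDICT (by name: the statement is the Claim_ definition above) =====
theorem contiguous_groups_spec : Claim_equal_contiguous_groups := by
  intro coords ld cd _ _
  unfold Spec_contiguous_groups
  set L := (PySem.List.sorted2 coords (fun x => pvIdx x ld) (fun x => pvIdx x cd)).map (pvKey ld cd) with hL
  have hfin : L.toFinset = (coords.map (pvKey ld cd)).toFinset :=
    List.toFinset_eq_of_perm _ _
      ((PySem.List.sorted2_perm coords (fun x => pvIdx x ld) (fun x => pvIdx x cd) false).map
        (pvKey ld cd))
  rw [contiguous_groups_eq, pvFold_none, pvScanTop_sorted L (pvSorted2_pairwise coords ld cd),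
    pvAlt_card, hfin]
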